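-- pv_equiv track=rewrite | github.com/uqwhua/TEA | dev_base.py | _has_overlapping
-- ===== SOURCE A (Python) =====
-- def _has_overlapping(context1, context2, min_pred=2):
--     if len(context1) == 0:
--         return False
--     if len(context2) == 0:
--         return False
--
--     pred1 = [x[2] for x in context1]
--     pred2 = [x[2] for x in context2]
--
--     intersection = set(pred1) & set(pred2)
--     if len(intersection) >= min_pred:
--         return True
--     return False
-- ===== SOURCE B (Python) =====
-- def _has_overlapping(context1, context2, min_pred=2):
--     if not context1 or not context2:
--         return False
--     a = sorted({x[2] for x in context1})
--     b = sorted({x[2] for x in context2})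
--     i = j = common = 0
--     while i < len(a) and j < len(b):
--         if a[i] < b[j]:
--             i += 1
--         elif b[j] < a[i]:
--             j += 1
--         else:
--             common += 1
--             i += 1
--             j += 1
--     return common >= min_pred
-- ===== Notes on version B (the rewrite author's own statement) =====
-- stated objective: alternative
-- what changed: B replaces the hash-set intersection with a sort-then-merge algorithm: it sorts the two deduplicated predicate lists and counts common values with a two-pointer merge scan, then compares the count to min_pred.
import Mathlib
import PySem

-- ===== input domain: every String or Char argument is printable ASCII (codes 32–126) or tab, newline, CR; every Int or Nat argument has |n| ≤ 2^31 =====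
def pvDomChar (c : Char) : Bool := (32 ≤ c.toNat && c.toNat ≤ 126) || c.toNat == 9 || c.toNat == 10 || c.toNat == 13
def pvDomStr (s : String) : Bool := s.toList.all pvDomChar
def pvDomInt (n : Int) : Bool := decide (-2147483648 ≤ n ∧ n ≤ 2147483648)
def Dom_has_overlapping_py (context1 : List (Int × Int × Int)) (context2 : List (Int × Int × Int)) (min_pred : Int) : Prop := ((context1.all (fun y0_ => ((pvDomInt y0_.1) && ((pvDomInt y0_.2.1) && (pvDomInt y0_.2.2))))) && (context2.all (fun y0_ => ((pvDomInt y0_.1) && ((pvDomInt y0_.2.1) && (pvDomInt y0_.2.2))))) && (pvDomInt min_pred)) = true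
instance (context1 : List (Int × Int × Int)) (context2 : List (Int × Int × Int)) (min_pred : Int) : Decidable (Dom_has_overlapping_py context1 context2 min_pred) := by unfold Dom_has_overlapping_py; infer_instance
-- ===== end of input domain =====

-- B replaces the hash-set intersection with sort + two-pointer merge counting of common
-- predicates (objective: alternative algorithm).

-- ===== PORT A =====
def has_overlapping_py (context1 : List (Int × Int × Int)) (context2 : List (Int × Int × Int)) (min_pred : Int) : Bool :=
  if context1.length = 0 then false
  else if context2.length = 0 then false
  else
    let pred1 := context1.map (fun x => x.2.2)
    let pred2 := context2.map (fun x => x.2.2)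
    let intersection := PySem.Set.inter (PySem.Set.ofList pred1) (PySem.Set.ofList pred2)
    if min_pred ≤ (intersection.length : Int) then true else false

-- ===== PORT B =====
-- the 'while i < len(a) and j < len(b)' merge loop, written as recursion on the
-- two list suffixes (i/j advancing = taking the tail)
def hoMerge : List Int → List Int → Nat
  | [], _ => 0
  | _ :: _, [] => 0
  | x :: a, y :: b =>
      if x < y then hoMerge a (y :: b)
      else if y < x then hoMerge (x :: a) b
      else 1 + hoMerge a b
termination_by a b => a.length + b.length
decreasing_by all_goals simp; try omega

def has_overlapping_py_alt (context1 : List (Int × Int × Int)) (context2 : List (Int × Int × Int)) (min_pred : Int) : Bool :=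
  if context1 = [] || context2 = [] then false
  else
    let a := PySem.List.sorted (PySem.Set.ofList (context1.map (fun x => x.2.2))) (fun p => p) false
    let b := PySem.List.sorted (PySem.Set.ofList (context2.map (fun x => x.2.2))) (fun p => p) false
    decide (min_pred ≤ (hoMerge a b : Int))

-- ===== PRECONDITION & SPEC =====
def Spec_has_overlapping_py (context1 : List (Int × Int × Int)) (context2 : List (Int × Int × Int)) (min_pred : Int) (out : Bool) : Prop := out = has_overlapping_py_alt context1 context2 min_pred
instance (context1 : List (Int × Int × Int)) (context2 : List (Int × Int × Int)) (min_pred : Int) (out : Bool) : Decidable (Spec_has_overlapping_py context1 context2 min_pred out) := by unfold Spec_has_overlapping_py; infer_instance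

-- ===== CLAIM (what is proved, stated in full; the proofs are below) =====
def Claim_equal_has_overlapping_py : Prop := ∀ (context1 : List (Int × Int × Int)) (context2 : List (Int × Int × Int)) (min_pred : Int), Dom_has_overlapping_py context1 context2 min_pred → Spec_has_overlapping_py context1 context2 min_pred (has_overlapping_py context1 context2 min_pred)

-- ===== LEMMAS AND PROOFS =====

-- merge count on strictly increasing lists = number of elements of a that occur in b
theorem hoMerge_eq_filter (a b : List Int) (ha : a.Pairwise (· < ·)) (hb : b.Pairwise (· < ·)) :
    hoMerge a b = (a.filter (fun z => decide (z ∈ b))).length := by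
  induction a generalizing b with
  | nil => cases b <;> simp [hoMerge]
  | cons x a ih =>
      induction b with
      | nil => simp [hoMerge]
      | cons y b ihb =>
          rw [List.pairwise_cons] at ha hb
          by_cases hxy : x < y
          · -- x < every element of y :: b, so x ∉ y :: b
            have hnot : x ∉ y :: b := by
              intro h
              rcases List.mem_cons.mp h with rfl | h
              · omega
              · have := hb.1 x h; omega
            rw [hoMerge]
            simp only [if_pos hxy]
            rw [ih (y :: b) ha.2 (List.pairwise_cons.mpr hb),
                List.filter_cons_of_neg (by simpa using hnot)]
          · by_cases hyx : y < x
            · -- y < every element of x :: a, so membership in y :: b ↔ in b for them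
              rw [hoMerge]
              simp only [if_neg hxy, if_pos hyx]
              rw [ihb hb.2]
              congr 1
              apply List.filter_congr
              intro z hz
              have hyz : y < z := by
                rcases List.mem_cons.mp hz with rfl | h
                · exact hyx
                · have := ha.1 z h; omega
              have hzy : z ≠ y := by omega
              simp [List.mem_cons, hzy]
            · -- x = y
              have hxey : x = y := by omega
              subst hxey
              rw [hoMerge]
              simp only [if_neg hxy]
              rw [ih b ha.2 hb.2,
                  List.filter_cons_of_pos (by simp)]
              simp only [List.length_cons, Nat.add_comm]
              congr 2
              apply List.filter_congr
              intro z hz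
              have hxz : x < z := ha.1 z hz
              have hzx : z ≠ x := by omega
              simp [List.mem_cons, hzx]

-- filter of the sorted deduped list has the same length as A's intersection set
theorem filter_sorted_length (p1 p2 : List Int) :
    ((PySem.List.sorted (PySem.Set.ofList p1) (fun p => p) false).filter
        (fun z => decide (z ∈ PySem.List.sorted (PySem.Set.ofList p2) (fun p => p) false))).length
      = (PySem.Set.inter (PySem.Set.ofList p1) (PySem.Set.ofList p2)).length := by
  have hnd1 : (PySem.List.sorted (PySem.Set.ofList p1) (fun p => p) false).Nodup :=
    (List.Perm.nodup_iff (PySem.List.sorted_perm _ _ _)).mpr (PySem.Set.nodup_ofList _)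
  apply List.Perm.length_eq
  rw [List.perm_ext_iff_of_nodup (hnd1.filter _)
    (PySem.Set.nodup_inter _ _ (PySem.Set.nodup_ofList _))]
  intro z
  rw [PySem.Set.mem_inter]
  simp [PySem.List.mem_sorted, PySem.Set.mem_ofList]

-- ===== VERDICT (by name: the statement is the Claim_ definition above) =====
theorem has_overlapping_py_spec : Claim_equal_has_overlapping_py := by
  intro c1 c2 mp _
  unfold Spec_has_overlapping_py has_overlapping_py has_overlapping_py_alt
  rcases c1 with _ | ⟨x, c1'⟩
  · simp
  rcases c2 with _ | ⟨y, c2'⟩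
  · simp
  simp only [List.length_cons, reduceCtorEq, Bool.or_self, if_false,
    Nat.succ_ne_zero]
  rw [hoMerge_eq_filter _ _ (PySem.List.sorted_ofList_pairwise_lt _)
        (PySem.List.sorted_ofList_pairwise_lt _),
      filter_sorted_length]
  split <;> simp_all
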